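-- pv_equiv track=rewrite | github.com/disiniruhansa/FYP-IMPLEMENTATION | EmpowerHer_Chatbot/eval/evaluate_response_generation.py | emotion_bucket
-- ===== SOURCE A (Python) =====
-- def emotion_bucket(labels):
--     labels = [l.lower() for l in (labels or [])]
--     if any(l in labels for l in ["fear", "anxiety", "nervousness", "worry"]):
--         return "anxious"
--     if any(l in labels for l in ["sadness", "disappointment", "grief", "loneliness", "remorse"]):
--         return "sad"
--     if any(l in labels for l in ["anger", "annoyance", "irritation", "disapproval"]):
--         return "angry"
--     return "mixed"
-- ===== SOURCE B (Python) =====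
-- _RANK = {
--     "fear": 0, "anxiety": 0, "nervousness": 0, "worry": 0,
--     "sadness": 1, "disappointment": 1, "grief": 1, "loneliness": 1, "remorse": 1,
--     "anger": 2, "annoyance": 2, "irritation": 2, "disapproval": 2,
-- }
--
-- def emotion_bucket(labels):
--     best = 3
--     for l in (labels or []):
--         best = min(best, _RANK.get(l.lower(), 3))
--     if best == 0:
--         return "anxious"
--     if best == 1:
--         return "sad"
--     if best == 2:
--         return "angry"
--     return "mixed"
-- ===== Notes on version B (the rewrite author's own statement) =====
-- stated objective: alternative
-- what changed: Replaced three sequential whole-list membership scans (one per emotion group) with a single pass over the labels that keeps the minimum priority rank found in one word-to-rank dictionary, mapping the final minimum back to a bucket name.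
import Mathlib
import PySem

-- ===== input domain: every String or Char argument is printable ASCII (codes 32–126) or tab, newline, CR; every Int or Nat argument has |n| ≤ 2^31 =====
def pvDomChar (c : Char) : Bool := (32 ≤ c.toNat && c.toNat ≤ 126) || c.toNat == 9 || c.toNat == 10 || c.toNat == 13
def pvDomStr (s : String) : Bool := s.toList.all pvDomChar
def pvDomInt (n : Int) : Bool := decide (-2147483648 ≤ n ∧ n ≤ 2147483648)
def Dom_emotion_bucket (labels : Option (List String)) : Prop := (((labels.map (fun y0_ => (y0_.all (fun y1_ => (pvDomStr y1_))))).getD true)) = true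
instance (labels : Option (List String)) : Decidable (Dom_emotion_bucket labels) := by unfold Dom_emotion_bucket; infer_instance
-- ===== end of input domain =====

-- B replaces A's three sequential whole-list membership scans with one pass over the
-- labels keeping the minimum priority rank from a word→rank dictionary (alternative
-- decomposition, same result).

-- ===== PORT A =====
def emotion_bucket (labels : Option (List String)) : String :=
  let lab := (labels.getD []).map PySem.Str.lower
  if ["fear", "anxiety", "nervousness", "worry"].any (fun l => lab.contains l) then "anxious"
  else if ["sadness", "disappointment", "grief", "loneliness", "remorse"].any (fun l => lab.contains l) then "sad"
  else if ["anger", "annoyance", "irritation", "disapproval"].any (fun l => lab.contains l) then "angry"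
  else "mixed"

-- ===== PORT B =====
def pvRank : PySem.Dict String Nat := PySem.Dict.ofList
  [("fear", 0), ("anxiety", 0), ("nervousness", 0), ("worry", 0),
   ("sadness", 1), ("disappointment", 1), ("grief", 1), ("loneliness", 1), ("remorse", 1),
   ("anger", 2), ("annoyance", 2), ("irritation", 2), ("disapproval", 2)]

def emotion_bucket_alt (labels : Option (List String)) : String :=
  let best := (labels.getD []).foldl (fun b l => min b (pvRank.getD (PySem.Str.lower l) 3)) 3
  if best = 0 then "anxious"
  else if best = 1 then "sad"
  else if best = 2 then "angry"
  else "mixed"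

-- ===== PRECONDITION & SPEC =====
def Spec_emotion_bucket (labels : Option (List String)) (out : String) : Prop := out = emotion_bucket_alt labels
instance (labels : Option (List String)) (out : String) : Decidable (Spec_emotion_bucket labels out) := by unfold Spec_emotion_bucket; infer_instance

-- ===== CLAIM (what is proved, stated in full; the proofs are below) =====
def Claim_equal_emotion_bucket : Prop := ∀ (labels : Option (List String)), Dom_emotion_bucket labels → Spec_emotion_bucket labels (emotion_bucket labels)

-- ===== LEMMAS AND PROOFS =====

-- the rank dictionary characterised as a chain of string tests
lemma pvRank_mk : pvRank = PySem.Dict.mk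
    [("fear", 0), ("anxiety", 0), ("nervousness", 0), ("worry", 0),
     ("sadness", 1), ("disappointment", 1), ("grief", 1), ("loneliness", 1), ("remorse", 1),
     ("anger", 2), ("annoyance", 2), ("irritation", 2), ("disapproval", 2)] := rfl

lemma pvRank_getD (s : String) : pvRank.getD s 3 =
    if s = "fear" ∨ s = "anxiety" ∨ s = "nervousness" ∨ s = "worry" then 0
    else if s = "sadness" ∨ s = "disappointment" ∨ s = "grief" ∨ s = "loneliness" ∨ s = "remorse" then 1
    else if s = "anger" ∨ s = "annoyance" ∨ s = "irritation" ∨ s = "disapproval" then 2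
    else 3 := by
  by_cases h1 : s = "fear"
  · subst h1; decide
  by_cases h2 : s = "anxiety"
  · subst h2; decide
  by_cases h3 : s = "nervousness"
  · subst h3; decide
  by_cases h4 : s = "worry"
  · subst h4; decide
  by_cases h5 : s = "sadness"
  · subst h5; decide
  by_cases h6 : s = "disappointment"
  · subst h6; decide
  by_cases h7 : s = "grief"
  · subst h7; decide
  by_cases h8 : s = "loneliness"
  · subst h8; decide
  by_cases h9 : s = "remorse"
  · subst h9; decide
  by_cases h10 : s = "anger"
  · subst h10; decide
  by_cases h11 : s = "annoyance"
  · subst h11; decide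
  by_cases h12 : s = "irritation"
  · subst h12; decide
  by_cases h13 : s = "disapproval"
  · subst h13; decide
  rw [pvRank_mk]
  simp only [PySem.Dict.getD_eq_get?_getD, PySem.Dict.get?_mk_cons, beq_iff_eq]
  rw [if_neg (Ne.symm h1), if_neg (Ne.symm h2), if_neg (Ne.symm h3), if_neg (Ne.symm h4), if_neg (Ne.symm h5), if_neg (Ne.symm h6), if_neg (Ne.symm h7), if_neg (Ne.symm h8), if_neg (Ne.symm h9), if_neg (Ne.symm h10), if_neg (Ne.symm h11), if_neg (Ne.symm h12), if_neg (Ne.symm h13),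
      if_neg (by simp [h1, h2, h3, h4]),
      if_neg (by simp [h5, h6, h7, h8, h9]),
      if_neg (by simp [h10, h11, h12, h13])]
  rfl


lemma pvRank_vals (s : String) :
    pvRank.getD s 3 = 0 ∨ pvRank.getD s 3 = 1 ∨ pvRank.getD s 3 = 2 ∨ pvRank.getD s 3 = 3 := by
  rw [pvRank_getD]; split_ifs <;> simp

lemma pvRank_eq0 (s : String) : pvRank.getD s 3 = 0 ↔
    (s = "fear" ∨ s = "anxiety" ∨ s = "nervousness" ∨ s = "worry") := by
  rw [pvRank_getD]; split_ifs <;> simp_all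

lemma pvRank_eq1 (s : String) : pvRank.getD s 3 = 1 ↔
    (s = "sadness" ∨ s = "disappointment" ∨ s = "grief" ∨ s = "loneliness" ∨ s = "remorse") := by
  rw [pvRank_getD]; split_ifs <;> simp_all <;> aesop

lemma pvRank_eq2 (s : String) : pvRank.getD s 3 = 2 ↔
    (s = "anger" ∨ s = "annoyance" ∨ s = "irritation" ∨ s = "disapproval") := by
  rw [pvRank_getD]; split_ifs <;> simp_all <;> aesop

-- the folded minimum, bracketed against the rank of some element
lemma foldl_min_le (r : String → Nat) (L : List String) : ∀ (a k : Nat),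
    (L.foldl (fun b l => min b (r l)) a ≤ k) ↔ (a ≤ k ∨ ∃ l ∈ L, r l ≤ k) := by
  induction L with
  | nil => simp
  | cons x xs ih => intro a k; simp [List.foldl_cons, ih, or_assoc]

-- any-membership scan over the lowered list, as an existential over the labels
lemma anyContains_iff (M g : List String) :
    (g.any (fun w => (M.map PySem.Str.lower).contains w) = true) ↔
      ∃ l ∈ M, PySem.Str.lower l ∈ g := by
  rw [List.any_eq_true]
  constructor
  · rintro ⟨w, hwg, hc⟩
    obtain ⟨l, hl, rfl⟩ := List.mem_map.mp (List.contains_iff_mem.mp hc)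
    exact ⟨l, hl, hwg⟩
  · rintro ⟨l, hl, hw⟩
    exact ⟨_, hw, List.contains_iff_mem.mpr (List.mem_map.mpr ⟨l, hl, rfl⟩)⟩

lemma pvRank_mem0 (s : String) : pvRank.getD s 3 = 0 ↔
    s ∈ (["fear", "anxiety", "nervousness", "worry"] : List String) := by
  rw [pvRank_eq0]; simp

lemma pvRank_mem1 (s : String) : pvRank.getD s 3 = 1 ↔
    s ∈ (["sadness", "disappointment", "grief", "loneliness", "remorse"] : List String) := by
  rw [pvRank_eq1]; simp

lemma pvRank_mem2 (s : String) : pvRank.getD s 3 = 2 ↔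
    s ∈ (["anger", "annoyance", "irritation", "disapproval"] : List String) := by
  rw [pvRank_eq2]; simp

-- ===== VERDICT (by name: the statement is the Claim_ definition above) =====
theorem emotion_bucket_spec : Claim_equal_emotion_bucket := by
  intro labels _
  show emotion_bucket labels = emotion_bucket_alt labels
  simp only [emotion_bucket, emotion_bucket_alt]
  generalize (labels.getD [] : List String) = M
  have hA0 : (["fear", "anxiety", "nervousness", "worry"].any
        (fun w => (M.map PySem.Str.lower).contains w) = true)
      ↔ ∃ l ∈ M, pvRank.getD (PySem.Str.lower l) 3 = 0 :=
    (anyContains_iff M _).trans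
      (exists_congr fun l => and_congr_right fun _ => (pvRank_mem0 _).symm)
  have hA1 : (["sadness", "disappointment", "grief", "loneliness", "remorse"].any
        (fun w => (M.map PySem.Str.lower).contains w) = true)
      ↔ ∃ l ∈ M, pvRank.getD (PySem.Str.lower l) 3 = 1 :=
    (anyContains_iff M _).trans
      (exists_congr fun l => and_congr_right fun _ => (pvRank_mem1 _).symm)
  have hA2 : (["anger", "annoyance", "irritation", "disapproval"].any
        (fun w => (M.map PySem.Str.lower).contains w) = true)
      ↔ ∃ l ∈ M, pvRank.getD (PySem.Str.lower l) 3 = 2 :=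
    (anyContains_iff M _).trans
      (exists_congr fun l => and_congr_right fun _ => (pvRank_mem2 _).symm)
  have push : ∀ k : Nat, M.foldl (fun b l => min b (pvRank.getD (PySem.Str.lower l) 3)) 3 ≤ k →
      3 ≤ k ∨ ∃ l ∈ M, pvRank.getD (PySem.Str.lower l) 3 ≤ k := fun k h =>
    (foldl_min_le _ M 3 k).mp h
  rcases Decidable.em (∃ l ∈ M, pvRank.getD (PySem.Str.lower l) 3 = 0) with h0 | h0
  · rw [if_pos (hA0.mpr h0)]
    obtain ⟨l, hl, hrl⟩ := h0
    have hm : M.foldl (fun b l => min b (pvRank.getD (PySem.Str.lower l) 3)) 3 = 0 :=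
      Nat.le_zero.mp ((foldl_min_le _ M 3 0).mpr (Or.inr ⟨l, hl, le_of_eq hrl⟩))
    rw [hm]; decide
  · rw [if_neg ((not_congr hA0).mpr h0)]
    rcases Decidable.em (∃ l ∈ M, pvRank.getD (PySem.Str.lower l) 3 = 1) with h1 | h1
    · rw [if_pos (hA1.mpr h1)]
      obtain ⟨l, hl, hrl⟩ := h1
      have hle : M.foldl (fun b l => min b (pvRank.getD (PySem.Str.lower l) 3)) 3 ≤ 1 :=
        (foldl_min_le _ M 3 1).mpr (Or.inr ⟨l, hl, by omega⟩)
      have hne : M.foldl (fun b l => min b (pvRank.getD (PySem.Str.lower l) 3)) 3 ≠ 0 := by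
        intro h
        rcases push 0 (le_of_eq h) with h3 | ⟨l', hl', hle'⟩
        · omega
        · exact h0 ⟨l', hl', Nat.le_zero.mp hle'⟩
      have hm : M.foldl (fun b l => min b (pvRank.getD (PySem.Str.lower l) 3)) 3 = 1 := by omega
      rw [hm]; decide
    · rw [if_neg ((not_congr hA1).mpr h1)]
      rcases Decidable.em (∃ l ∈ M, pvRank.getD (PySem.Str.lower l) 3 = 2) with h2 | h2
      · rw [if_pos (hA2.mpr h2)]
        obtain ⟨l, hl, hrl⟩ := h2
        have hle : M.foldl (fun b l => min b (pvRank.getD (PySem.Str.lower l) 3)) 3 ≤ 2 :=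
          (foldl_min_le _ M 3 2).mpr (Or.inr ⟨l, hl, by omega⟩)
        have hne : ¬ M.foldl (fun b l => min b (pvRank.getD (PySem.Str.lower l) 3)) 3 ≤ 1 := by
          intro h
          rcases push 1 h with h3 | ⟨l', hl', hle'⟩
          · omega
          · rcases pvRank_vals (PySem.Str.lower l') with hv | hv | hv | hv
            · exact h0 ⟨l', hl', hv⟩
            · exact h1 ⟨l', hl', hv⟩
            · omega
            · omega
        have hm : M.foldl (fun b l => min b (pvRank.getD (PySem.Str.lower l) 3)) 3 = 2 := by omega
        rw [hm]; decide
      · rw [if_neg ((not_congr hA2).mpr h2)]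
        have hne : ¬ M.foldl (fun b l => min b (pvRank.getD (PySem.Str.lower l) 3)) 3 ≤ 2 := by
          intro h
          rcases push 2 h with h3 | ⟨l', hl', hle'⟩
          · omega
          · rcases pvRank_vals (PySem.Str.lower l') with hv | hv | hv | hv
            · exact h0 ⟨l', hl', hv⟩
            · exact h1 ⟨l', hl', hv⟩
            · exact h2 ⟨l', hl', hv⟩
            · omega
        have hle3 : M.foldl (fun b l => min b (pvRank.getD (PySem.Str.lower l) 3)) 3 ≤ 3 :=
          (foldl_min_le _ M 3 3).mpr (Or.inl le_rfl)
        have hm : M.foldl (fun b l => min b (pvRank.getD (PySem.Str.lower l) 3)) 3 = 3 := by omega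
        rw [hm]; decide
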